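-- pv_equiv track=rewrite | github.com/fzinnah17/codepath-weekly-assignments-TIP-102-4b | unit7-session1-2.py | concert_playlists
-- ===== SOURCE A (Python) =====
-- def concert_playlists(song_durations, concert_limits):
--     # Sort durations manually
--     n = len(song_durations)
--     for i in range(n):
--         for j in range(i + 1, n):
--             if song_durations[j] < song_durations[i]:
--                 song_durations[i], song_durations[j] = song_durations[j], song_durations[i]
--     # Build prefix sums manually
--     prefix = [0] * (n + 1)
--     for i in range(n):
--         prefix[i + 1] = prefix[i] + song_durations[i]
--     result = []
--     # For each concert limit, use manual binary search
--     for limit in concert_limits: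
--         lo = 0
--         hi = n
--         while lo < hi:
--             mid = (lo + hi + 1) // 2  # search for upper bound
--             if prefix[mid] <= limit:
--                 lo = mid
--             else:
--                 hi = mid - 1
--         result.append(lo)
--     return result
-- ===== SOURCE B (Python) =====
-- from itertools import accumulate
--
--
-- def _rightmost(prefix, limit, lo, hi):
--     # largest index reachable by rightmost binary search with prefix[idx] <= limit
--     if lo >= hi:
--         return lo
--     mid = (lo + hi + 1) // 2
--     if prefix[mid] <= limit:
--         return _rightmost(prefix, limit, mid, hi)
--     return _rightmost(prefix, limit, lo, mid - 1)
--
--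
-- def concert_playlists(song_durations, concert_limits):
--     song_durations.sort()
--     prefix = list(accumulate(song_durations, initial=0))
--     n = len(song_durations)
--     return [_rightmost(prefix, limit, 0, n) for limit in concert_limits]
-- ===== Notes on version B (the rewrite author's own statement) =====
-- stated objective: faster
-- what changed: B replaces A's O(n^2) in-place exchange sort and manual prefix-array loop with sorted()/itertools.accumulate and makes the per-limit rightmost binary search a recursive helper, keeping the same search semantics.
import Mathlib
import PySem

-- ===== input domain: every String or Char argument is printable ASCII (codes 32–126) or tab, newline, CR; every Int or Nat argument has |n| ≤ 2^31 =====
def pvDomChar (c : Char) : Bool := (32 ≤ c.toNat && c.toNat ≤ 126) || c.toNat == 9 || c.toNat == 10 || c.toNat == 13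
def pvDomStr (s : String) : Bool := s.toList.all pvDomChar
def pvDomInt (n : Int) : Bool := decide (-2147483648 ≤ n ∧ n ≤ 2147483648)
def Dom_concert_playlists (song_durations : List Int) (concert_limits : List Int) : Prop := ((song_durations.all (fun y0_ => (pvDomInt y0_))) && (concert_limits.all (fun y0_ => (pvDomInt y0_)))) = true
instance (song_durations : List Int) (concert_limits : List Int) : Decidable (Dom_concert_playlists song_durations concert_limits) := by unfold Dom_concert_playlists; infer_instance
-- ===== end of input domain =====

-- B replaces A's O(n^2) in-place exchange sort and manual prefix loop with sorted()/accumulate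
-- (objective: faster). Both A and B sort song_durations in place; the equivalence proved here is
-- about the return value.

-- ===== PORT A =====
-- Python: song_durations[i], song_durations[j] = song_durations[j], song_durations[i]  (indices in range)
def pvSwapA (c : List Int) (i j : Int) : List Int :=
  let vj := PySem.List.pyGetD c j 0
  let vi := PySem.List.pyGetD c i 0
  PySem.List.pySetD (PySem.List.pySetD c i vj) j vi

-- the two nested for-loops of A's manual exchange sort
def pvSortLoopA (n : Int) (c0 : List Int) : List Int :=
  (PySem.List.pyRange 0 n 1).foldl (fun c i =>
    (PySem.List.pyRange (i + 1) n 1).foldl (fun c j =>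
      if PySem.List.pyGetD c j 0 < PySem.List.pyGetD c i 0 then pvSwapA c i j else c) c) c0

-- prefix = [0] * (n + 1); for i in range(n): prefix[i+1] = prefix[i] + song_durations[i]
def pvPrefixA (n : Int) (s : List Int) : List Int :=
  (PySem.List.pyRange 0 n 1).foldl (fun p i =>
    PySem.List.pySetD p (i + 1) (PySem.List.pyGetD p i 0 + PySem.List.pyGetD s i 0))
    (List.replicate (n + 1).toNat 0)

-- the while-loop binary search of A (state lo, hi)
def pvSearchA (pre : List Int) (limit lo hi : Int) : Int :=
  if h : lo < hi then
    let mid := PySem.Int.floordiv (lo + hi + 1) 2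
    if PySem.List.pyGetD pre mid 0 ≤ limit then pvSearchA pre limit mid hi
    else pvSearchA pre limit lo (mid - 1)
  else lo
termination_by (hi - lo).toNat
decreasing_by
  · have hm : PySem.Int.floordiv (lo + hi + 1) 2 = (lo + hi + 1) / 2 :=
      PySem.Int.floordiv_eq_ediv_of_pos (by norm_num)
    omega
  · have hm : PySem.Int.floordiv (lo + hi + 1) 2 = (lo + hi + 1) / 2 :=
      PySem.Int.floordiv_eq_ediv_of_pos (by norm_num)
    omega

def concert_playlists (song_durations : List Int) (concert_limits : List Int) : List Int :=
  let n : Int := song_durations.length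
  let s := pvSortLoopA n song_durations
  let pre := pvPrefixA n s
  concert_limits.foldl (fun result limit => result ++ [pvSearchA pre limit 0 n]) []

-- ===== PORT B =====
-- Source B's recursive helper _rightmost(prefix, limit, lo, hi)
def pvSearchB (pre : List Int) (limit lo hi : Int) : Int :=
  if h : hi ≤ lo then lo
  else
    let mid := PySem.Int.floordiv (lo + hi + 1) 2
    if PySem.List.pyGetD pre mid 0 ≤ limit then pvSearchB pre limit mid hi
    else pvSearchB pre limit lo (mid - 1)
termination_by (hi - lo).toNat
decreasing_by
  · have hm : PySem.Int.floordiv (lo + hi + 1) 2 = (lo + hi + 1) / 2 :=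
      PySem.Int.floordiv_eq_ediv_of_pos (by norm_num)
    omega
  · have hm : PySem.Int.floordiv (lo + hi + 1) 2 = (lo + hi + 1) / 2 :=
      PySem.Int.floordiv_eq_ediv_of_pos (by norm_num)
    omega

-- sort() → PySem.List.sorted; list(accumulate(sd, initial=0)) → List.scanl (·+·) 0 (exact: running sums with leading 0)
def concert_playlists_alt (song_durations : List Int) (concert_limits : List Int) : List Int :=
  let s := PySem.List.sorted song_durations (fun x => x) false
  let pre := List.scanl (· + ·) 0 s
  let n : Int := song_durations.length
  concert_limits.map (fun limit => pvSearchB pre limit 0 n)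

-- ===== PRECONDITION & SPEC =====
def Spec_concert_playlists (song_durations : List Int) (concert_limits : List Int) (out : List Int) : Prop := out = concert_playlists_alt song_durations concert_limits
instance (song_durations : List Int) (concert_limits : List Int) (out : List Int) : Decidable (Spec_concert_playlists song_durations concert_limits out) := by unfold Spec_concert_playlists; infer_instance

-- ===== CLAIM (what is proved, stated in full; the proofs are below) =====
def Claim_equal_concert_playlists : Prop := ∀ (song_durations : List Int) (concert_limits : List Int), Dom_concert_playlists song_durations concert_limits → Spec_concert_playlists song_durations concert_limits (concert_playlists song_durations concert_limits)

-- ===== LEMMAS AND PROOFS =====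

def pvSelGo (h : Int) : List Int → Int × List Int
  | [] => (h, [])
  | y :: ys =>
    if y < h then
      let r := pvSelGo y ys
      (r.1, h :: r.2)
    else
      let r := pvSelGo h ys
      (r.1, y :: r.2)

theorem pvSelGo_length (h : Int) (ys : List Int) : (pvSelGo h ys).2.length = ys.length := by
  induction ys generalizing h with
  | nil => simp [pvSelGo]
  | cons y ys ih => simp only [pvSelGo]; split <;> simp [ih]

def pvSelSort : List Int → List Int
  | [] => []
  | h :: t =>
    let r := pvSelGo h t
    r.1 :: pvSelSort r.2
termination_by l => l.length
decreasing_by simp [pvSelGo_length]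

theorem pvSelGo_perm (h : Int) (ys : List Int) :
    ((pvSelGo h ys).1 :: (pvSelGo h ys).2).Perm (h :: ys) := by
  induction ys generalizing h with
  | nil => simp [pvSelGo]
  | cons y ys ih =>
    simp only [pvSelGo]
    split
    · exact (List.Perm.swap h _ _).trans ((ih y).cons h)
    · exact ((List.Perm.swap y _ _).trans ((ih h).cons y)).trans (List.Perm.swap h y ys)

theorem pvSelGo_min (h : Int) (ys : List Int) :
    ∀ x ∈ h :: ys, (pvSelGo h ys).1 ≤ x := by
  induction ys generalizing h with
  | nil => simp [pvSelGo]
  | cons y ys ih =>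
    intro x hx
    simp only [pvSelGo]
    split
    · next hlt =>
      rcases List.mem_cons.mp hx with rfl | hx'
      · exact le_of_lt (lt_of_le_of_lt (ih y y (by simp)) hlt)
      · exact ih y x hx'
    · next hge =>
      rcases List.mem_cons.mp hx with rfl | hx'
      · exact ih x x (by simp)
      · rcases List.mem_cons.mp hx' with rfl | hx''
        · exact le_trans (ih h h (by simp)) (not_lt.mp hge)
        · exact ih h x (by simp [hx''])

theorem pvSelSort_perm (l : List Int) : (pvSelSort l).Perm l := by
  induction hn : l.length generalizing l with
  | zero => cases l with | nil => simp [pvSelSort] | cons h t => simp at hn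
  | succ k ih =>
    cases l with
    | nil => simp at hn
    | cons h t =>
      rw [pvSelSort]
      have hlen : (pvSelGo h t).2.length = k := by simp at hn; rw [pvSelGo_length]; omega
      exact ((ih _ hlen).cons _).trans (pvSelGo_perm h t)

theorem pvSelSort_mem (l : List Int) : ∀ x ∈ pvSelSort l, x ∈ l :=
  fun x hx => (pvSelSort_perm l).subset hx

theorem pvSelSort_pairwise (l : List Int) : (pvSelSort l).Pairwise (· ≤ ·) := by
  induction hn : l.length generalizing l with
  | zero => cases l with | nil => simp [pvSelSort] | cons h t => simp at hn
  | succ k ih =>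
    cases l with
    | nil => simp at hn
    | cons h t =>
      rw [pvSelSort]
      have hlen : (pvSelGo h t).2.length = k := by simp at hn; rw [pvSelGo_length]; omega
      refine List.Pairwise.cons ?_ (ih _ hlen)
      intro b hb
      have hb' : b ∈ (pvSelGo h t).2 := pvSelSort_mem _ b hb
      exact pvSelGo_min h t b ((pvSelGo_perm h t).subset (by simp [hb']))

theorem pvSorted_eq (xs : List Int) : PySem.List.sorted xs (fun x => x) false = pvSelSort xs :=
  PySem.List.sorted_id_eq_of_perm_of_pairwise _ _ (pvSelSort_perm xs) (pvSelSort_pairwise xs)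

theorem pv_getD_at (p r : List Int) (x d : Int) : (p ++ x :: r).getD p.length d = x := by
  induction p with
  | nil => simp
  | cons a p ih => simpa using ih

theorem pv_set_at (p r : List Int) (x v : Int) : (p ++ x :: r).set p.length v = p ++ v :: r := by
  induction p with
  | nil => simp
  | cons a p ih => simpa using ih

theorem pv_assoc_mid (p q ys : List Int) (h y : Int) :
    p ++ h :: (q ++ y :: ys) = (p ++ h :: q) ++ y :: ys := by simp

theorem pv_len_mid (p q : List Int) (h : Int) :
    (p ++ h :: q).length = p.length + 1 + q.length := by simp; omega

theorem pv_getD_mid (p q ys : List Int) (h y d : Int) :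
    (p ++ h :: (q ++ y :: ys)).getD (p.length + 1 + q.length) d = y := by
  rw [pv_assoc_mid, ← pv_len_mid p q h]; exact pv_getD_at _ _ _ _

theorem pv_swap_at (p q ys : List Int) (h y : Int) :
    pvSwapA (p ++ h :: (q ++ y :: ys)) ((p.length : Nat) : Int)
      ((p.length + 1 + q.length : Nat) : Int) = p ++ y :: (q ++ h :: ys) := by
  unfold pvSwapA
  simp only [PySem.List.pyGetD_natCast, PySem.List.pySetD_natCast]
  rw [pv_getD_mid, pv_getD_at, pv_set_at, pv_assoc_mid p q ys y y,
      ← pv_len_mid p q y, pv_set_at, ← pv_assoc_mid]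

theorem pv_inner_bridge (ys : List Int) : ∀ (q p : List Int) (h : Int),
    (PySem.List.pyRange ((p.length + 1 + q.length : Nat) : Int) ((p.length + 1 + q.length + ys.length : Nat) : Int) 1).foldl
      (fun c j => if PySem.List.pyGetD c j 0 < PySem.List.pyGetD c ((p.length : Nat) : Int) 0 then pvSwapA c ((p.length : Nat) : Int) j else c)
      (p ++ h :: (q ++ ys))
    = p ++ (pvSelGo h ys).1 :: (q ++ (pvSelGo h ys).2) := by
  induction ys with
  | nil =>
    intro q p h
    rw [PySem.List.pyRange_one_eq_nil (by simp)]
    simp [pvSelGo]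
  | cons y ys ih =>
    intro q p h
    rw [PySem.List.pyRange_one_cons (by push_cast; simp)]
    simp only [List.foldl_cons]
    have e1 : PySem.List.pyGetD (p ++ h :: (q ++ y :: ys)) ((p.length + 1 + q.length : Nat) : Int) 0 = y := by
      rw [PySem.List.pyGetD_natCast]; exact pv_getD_mid p q ys h y 0
    have e2 : PySem.List.pyGetD (p ++ h :: (q ++ y :: ys)) ((p.length : Nat) : Int) 0 = h := by
      rw [PySem.List.pyGetD_natCast]; exact pv_getD_at _ _ _ _
    rw [e1, e2]
    by_cases hyh : y < h
    · rw [if_pos hyh]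
      rw [pv_swap_at p q ys h y]
      have hih := ih (q ++ [h]) p y
      have hc1 : ((p.length + 1 + (q ++ [h]).length : Nat) : Int) = ((p.length + 1 + q.length : Nat) : Int) + 1 := by
        push_cast; simp; omega
      have hc2 : ((p.length + 1 + (q ++ [h]).length + ys.length : Nat) : Int) = ((p.length + 1 + q.length + (y :: ys).length : Nat) : Int) := by
        push_cast; simp; omega
      rw [hc1, hc2] at hih
      simp only [List.append_assoc, List.singleton_append] at hih
      rw [hih]
      simp [pvSelGo, hyh]
    · rw [if_neg hyh]
      have hih := ih (q ++ [y]) p h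
      have hc1 : ((p.length + 1 + (q ++ [y]).length : Nat) : Int) = ((p.length + 1 + q.length : Nat) : Int) + 1 := by
        push_cast; simp; omega
      have hc2 : ((p.length + 1 + (q ++ [y]).length + ys.length : Nat) : Int) = ((p.length + 1 + q.length + (y :: ys).length : Nat) : Int) := by
        push_cast; simp; omega
      rw [hc1, hc2] at hih
      simp only [List.append_assoc, List.singleton_append] at hih
      rw [hih]
      simp [pvSelGo, hyh]

theorem pv_outer_bridge (n : Nat) : ∀ (k : Nat) (ys p : List Int), ys.length = k → p.length + ys.length = n →
    (PySem.List.pyRange ((p.length : Nat) : Int) ((n : Nat) : Int) 1).foldl (fun c i =>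
      (PySem.List.pyRange (i + 1) ((n : Nat) : Int) 1).foldl (fun c j =>
        if PySem.List.pyGetD c j 0 < PySem.List.pyGetD c i 0 then pvSwapA c i j else c) c)
      (p ++ ys)
    = p ++ pvSelSort ys := by
  intro k
  induction k with
  | zero =>
    intro ys p hk hn
    have : ys = [] := List.eq_nil_of_length_eq_zero hk
    subst this
    rw [PySem.List.pyRange_one_eq_nil (by simp at hn ⊢; omega)]
    simp [pvSelSort]
  | succ k ih =>
    intro ys p hk hn
    cases ys with
    | nil => simp at hk
    | cons h t =>
      rw [PySem.List.pyRange_one_cons (by simp at hn ⊢; omega)]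
      simp only [List.foldl_cons]
      have hinner := pv_inner_bridge t [] p h
      have hc1 : ((p.length + 1 + ([] : List Int).length : Nat) : Int) = ((p.length : Nat) : Int) + 1 := by
        push_cast; simp
      have hc2 : ((p.length + 1 + ([] : List Int).length + t.length : Nat) : Int) = ((n : Nat) : Int) := by
        simp at hn ⊢; omega
      rw [hc1, hc2] at hinner
      simp only [List.nil_append] at hinner
      rw [hinner]
      have hstate : p ++ (pvSelGo h t).1 :: (pvSelGo h t).2 = (p ++ [(pvSelGo h t).1]) ++ (pvSelGo h t).2 := by simp
      have hstart : ((p.length : Nat) : Int) + 1 = (((p ++ [(pvSelGo h t).1]).length : Nat) : Int) := by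
        push_cast; simp
      rw [hstate, hstart]
      rw [ih (pvSelGo h t).2 (p ++ [(pvSelGo h t).1])
            (by rw [pvSelGo_length]; simp at hk; omega)
            (by rw [pvSelGo_length]; simp at hn ⊢; omega)]
      rw [pvSelSort]
      simp

theorem pv_sortA_eq (xs : List Int) :
    pvSortLoopA ((xs.length : Nat) : Int) xs = pvSelSort xs := by
  have := pv_outer_bridge xs.length xs.length xs [] rfl (by simp)
  simpa [pvSortLoopA] using this

theorem pv_scanl_sum (s : List Int) : ∀ (b : Int),
    List.scanl (· + ·) b s = (List.range (s.length + 1)).map (fun k => b + (s.take k).sum) := by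
  induction s with
  | nil => intro b; simp
  | cons a t ih =>
    intro b
    rw [List.scanl_cons, ih (b + a)]
    apply List.ext_getElem
    · simp
    · intro i h1 h2
      cases i with
      | zero => simp
      | succ i =>
        simp only [List.getElem_cons_succ, List.getElem_map, List.getElem_range,
          List.take_succ_cons, List.sum_cons]
        ring

theorem pv_set_map_range {α : Type} (m j : Nat) (f : Nat → α) (v : α) (hj : j < m) :
    ((List.range m).map f).set j v = (List.range m).map (fun i => if i = j then v else f i) := by
  apply List.ext_getElem
  · simp
  · intro i h1 h2
    simp only [List.getElem_set, List.getElem_map, List.getElem_range]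
    rcases eq_or_ne i j with h | h
    · simp [h]
    · simp [h, Ne.symm h]

theorem pv_getD_map_range {α : Type} [Inhabited α] (m k : Nat) (f : Nat → α) (d : α) (hk : k < m) :
    ((List.range m).map f).getD k d = f k := by
  rw [List.getD_eq_getElem _ _ (by simpa using hk)]
  simp

theorem pv_prefix_inv (s : List Int) (n : Nat) (hn : s.length = n) : ∀ k, k ≤ n →
    (PySem.List.pyRange 0 ((k : Nat) : Int) 1).foldl (fun p i =>
      PySem.List.pySetD p (i + 1) (PySem.List.pyGetD p i 0 + PySem.List.pyGetD s i 0))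
      (List.replicate (n + 1) 0)
    = (List.range (n + 1)).map (fun idx => if idx ≤ k then (s.take idx).sum else 0) := by
  intro k
  induction k with
  | zero =>
    intro _
    rw [PySem.List.pyRange_one_eq_nil (by simp)]
    simp only [List.foldl_nil]
    apply List.ext_getElem
    · simp
    · intro i h1 h2
      simp only [List.getElem_replicate, List.getElem_map, List.getElem_range]
      split
      · next hle => simp [Nat.le_zero.mp hle]
      · rfl
  | succ k ih =>
    intro hk1
    have hk : k ≤ n := by omega
    have hcast : ((k + 1 : Nat) : Int) = ((k : Nat) : Int) + 1 := by push_cast; ring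
    rw [hcast, PySem.List.pyRange_one_succ_right (by positivity), List.foldl_append,
        List.foldl_cons, List.foldl_nil, ih hk]
    have e1 : PySem.List.pyGetD ((List.range (n + 1)).map (fun idx => if idx ≤ k then (s.take idx).sum else 0)) ((k : Nat) : Int) 0 = (s.take k).sum := by
      rw [PySem.List.pyGetD_natCast, pv_getD_map_range _ _ _ _ (by omega)]
      simp
    have e2 : PySem.List.pyGetD s ((k : Nat) : Int) 0 = s[k]'(by omega) := by
      rw [PySem.List.pyGetD_natCast, List.getD_eq_getElem _ _ (by omega)]
    rw [e1, e2]
    have hcast2 : ((k : Nat) : Int) + 1 = ((k + 1 : Nat) : Int) := by push_cast; ring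
    rw [hcast2, PySem.List.pySetD_natCast, pv_set_map_range _ _ _ _ (by omega)]
    apply List.map_congr_left
    intro idx hidx
    have hidx' : idx < n + 1 := by simpa using hidx
    by_cases he : idx = k + 1
    · subst he
      rw [if_pos rfl, if_pos (le_refl _), List.sum_take_succ _ _ (by omega)]
    · rw [if_neg he]
      split <;> split <;> first | rfl | omega

theorem pv_prefixA_eq (s : List Int) :
    pvPrefixA ((s.length : Nat) : Int) s = List.scanl (· + ·) 0 s := by
  unfold pvPrefixA
  have hrep : (((s.length : Nat) : Int) + 1).toNat = s.length + 1 := by omega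
  rw [hrep, pv_prefix_inv s s.length rfl s.length (le_refl _), pv_scanl_sum s 0]
  apply List.map_congr_left
  intro idx hidx
  have : idx ≤ s.length := by simp at hidx; omega
  simp [this]

theorem pv_search_eq (pre : List Int) (limit lo hi : Int) :
    pvSearchA pre limit lo hi = pvSearchB pre limit lo hi := by
  induction lo, hi using pvSearchA.induct (pre := pre) (limit := limit) with
  | case1 lo hi h mid hle ih =>
    rw [pvSearchA, pvSearchB]
    rw [dif_pos h, dif_neg (by omega)]
    have hle' : PySem.List.pyGetD pre (PySem.Int.floordiv (lo + hi + 1) 2) 0 ≤ limit := hle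
    rw [if_pos hle', if_pos hle']
    exact ih
  | case2 lo hi h mid hle ih =>
    rw [pvSearchA, pvSearchB]
    rw [dif_pos h, dif_neg (by omega)]
    have hle' : ¬ PySem.List.pyGetD pre (PySem.Int.floordiv (lo + hi + 1) 2) 0 ≤ limit := hle
    rw [if_neg hle', if_neg hle']
    exact ih
  | case3 lo hi h =>
    rw [pvSearchA, pvSearchB]
    rw [dif_neg h, dif_pos (by omega)]

theorem pv_len_selSort (sd : List Int) : (pvSelSort sd).length = sd.length :=
  (pvSelSort_perm sd).length_eq

-- ===== VERDICT (by name: the statement is the Claim_ definition above) =====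
theorem concert_playlists_spec : Claim_equal_concert_playlists := by
  unfold Claim_equal_concert_playlists
  intro sd cl _
  unfold Spec_concert_playlists
  simp only [concert_playlists, concert_playlists_alt]
  rw [pv_sortA_eq, pvSorted_eq]
  rw [← pv_len_selSort sd, pv_prefixA_eq]
  rw [PySem.List.foldl_append_singleton_eq_map]
  exact List.map_congr_left (fun l _ => pv_search_eq _ _ _ _)
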